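-- pv_equiv track=rewrite | github.com/uscnlp-lime/Inter-Intent | avalon_evaluation.py | min_context_for_intent_guessing
-- ===== SOURCE A (Python) =====
-- def min_context_for_intent_guessing(context):
--     lines = context.split('\n')
--
--     rs = []
--     incl = False
--     speaker_name = None
--     for line in lines:
--         # if not incl and line.startswith('**Current Leader**:'):
--         #     incl = True
--         # if incl:
--         rs.append(line)
--         if line.startswith('**Player Name**:'):
--             speaker_name = line.split(': ')[-1].strip()
--     return '\n'.join(rs), speaker_name
-- ===== SOURCE B (Python) =====
-- def min_context_for_intent_guessing(context):
--     speaker_name = None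
--     for line in reversed(context.split('\n')):
--         if line.startswith('**Player Name**:'):
--             speaker_name = line.split(': ')[-1].strip()
--             break
--     return context, speaker_name
-- ===== Notes on version B (the rewrite author's own statement) =====
-- stated objective: simpler
-- what changed: B returns context unchanged (the join over split lines reconstructs the input exactly) and finds the speaker by a reverse scan that stops at the first matching line, dropping A's rs buffer and its keep-overwriting forward pass.
import Mathlib
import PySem

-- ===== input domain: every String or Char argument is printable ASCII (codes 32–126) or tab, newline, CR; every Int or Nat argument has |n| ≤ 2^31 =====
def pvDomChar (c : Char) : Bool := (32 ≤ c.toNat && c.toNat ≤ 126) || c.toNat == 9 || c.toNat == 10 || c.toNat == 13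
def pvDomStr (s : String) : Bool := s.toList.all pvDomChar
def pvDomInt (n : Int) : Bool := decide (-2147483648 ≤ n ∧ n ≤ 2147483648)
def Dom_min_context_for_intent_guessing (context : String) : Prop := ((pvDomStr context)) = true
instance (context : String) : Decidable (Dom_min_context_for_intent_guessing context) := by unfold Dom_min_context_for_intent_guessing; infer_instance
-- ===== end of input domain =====

-- B returns the input string unchanged (the join over split lines reconstructs it exactly) and
-- finds the speaker by a reverse short-circuit scan instead of A's forward keep-overwriting pass.

-- shared thin wrapper for Python's s.split(sep) with nonempty sep, at String level
def pySplit (s sep : String) : List String :=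
  (PySem.Chars.splitOn s.toList sep.toList).map String.ofList

-- ===== PORT A =====
def min_context_for_intent_guessing (context : String) : String × Option String :=
  let lines := pySplit context "\n"
  let r := lines.foldl (fun (st : List String × Option String) line =>
      let rs := st.1 ++ [line]
      let speaker_name :=
        if PySem.Str.startswith line "**Player Name**:" = true then
          some (PySem.Str.strip (PySem.List.pyGetD (pySplit line ": ") (-1) ""))
        else st.2
      (rs, speaker_name)) ([], none)
  (PySem.Str.join "\n" r.1, r.2)

-- ===== PORT B =====
def findSpeakerRev : List String → Option String
  | [] => none
  | line :: rest =>
    if PySem.Str.startswith line "**Player Name**:" = true then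
      some (PySem.Str.strip (PySem.List.pyGetD (pySplit line ": ") (-1) ""))
    else findSpeakerRev rest

def min_context_for_intent_guessing_alt (context : String) : String × Option String :=
  (context, findSpeakerRev (pySplit context "\n").reverse)

-- ===== PRECONDITION & SPEC =====
def Spec_min_context_for_intent_guessing (context : String) (out : String × Option String) : Prop := out = min_context_for_intent_guessing_alt context
instance (context : String) (out : String × Option String) : Decidable (Spec_min_context_for_intent_guessing context out) := by unfold Spec_min_context_for_intent_guessing; infer_instance

-- ===== CLAIM (what is proved, stated in full; the proofs are below) =====
def Claim_equal_min_context_for_intent_guessing : Prop := ∀ (context : String), Dom_min_context_for_intent_guessing context → Spec_min_context_for_intent_guessing context (min_context_for_intent_guessing context)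

-- ===== LEMMAS AND PROOFS =====

-- structural single-char '\n' split (proof-side model of PySem.Chars.splitOn with sep = ['\n'])
def nlSplit : List Char → List (List Char)
  | [] => [[]]
  | c :: rest => if c = '\n' then [] :: nlSplit rest else (nlSplit rest).modifyHead (c :: ·)

theorem nlSplit_ne_nil (l : List Char) : nlSplit l ≠ [] := by
  induction l with
  | nil => simp [nlSplit]
  | cons c rest ih =>
    simp only [nlSplit]
    split_ifs
    · simp
    · cases h : nlSplit rest with
      | nil => exact absurd h ih
      | cons a t => simp

theorem splitOn_go_nl (l : List Char) : ∀ (fuel : Nat) (cur : List Char) (acc : List (List Char)),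
    l.length < fuel →
    PySem.Chars.splitOn.go ['\n'] fuel l cur acc
      = acc.reverse ++ (nlSplit l).modifyHead (cur.reverse ++ ·) := by
  induction l with
  | nil =>
    intro fuel cur acc h
    cases fuel with
    | zero => omega
    | succ n => simp [PySem.Chars.splitOn.go, nlSplit, List.modifyHead]
  | cons c rest ih =>
    intro fuel cur acc h
    cases fuel with
    | zero => omega
    | succ n =>
      simp only [PySem.Chars.splitOn.go]
      by_cases hc : c = '\n'
      · subst hc
        have hpre : List.isPrefixOf ['\n'] ('\n' :: rest) = true := by
          simp [List.isPrefixOf]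
        simp only [hpre, if_pos]
        have hdrop : List.drop (['\n'].length) ('\n' :: rest) = rest := rfl
        rw [hdrop, ih n [] ((cur.reverse) :: acc) (by simpa using Nat.lt_of_succ_lt_succ h)]
        simp [nlSplit, List.modifyHead]
        cases hns : nlSplit rest with
        | nil => exact absurd hns (nlSplit_ne_nil rest)
        | cons a t => simp
      · have hpre : List.isPrefixOf ['\n'] (c :: rest) = false := by
          simp [List.isPrefixOf]
          exact fun hh => absurd hh.symm hc
        simp only [hpre, Bool.false_eq_true, if_false]
        rw [ih n (c :: cur) acc (Nat.lt_of_succ_lt_succ h)]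
        simp only [nlSplit, if_neg hc]
        cases hns : nlSplit rest with
        | nil => exact absurd hns (nlSplit_ne_nil rest)
        | cons a t => simp [List.modifyHead]

theorem splitOn_nl_eq (s : List Char) : PySem.Chars.splitOn s ['\n'] = nlSplit s := by
  unfold PySem.Chars.splitOn
  rw [splitOn_go_nl s (s.length + 1) [] [] (by omega)]
  cases hns : nlSplit s with
  | nil => exact absurd hns (nlSplit_ne_nil s)
  | cons a t => simp [List.modifyHead]

theorem intercalate_cons2 (sep a b : List Char) (t : List (List Char)) :
    List.intercalate sep (a :: b :: t) = a ++ sep ++ List.intercalate sep (b :: t) := by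
  simp [List.intercalate, List.intersperse]

theorem intercalate_nlSplit (l : List Char) : List.intercalate ['\n'] (nlSplit l) = l := by
  induction l with
  | nil => simp [nlSplit, List.intercalate]
  | cons c rest ih =>
    simp only [nlSplit]
    by_cases hc : c = '\n'
    · subst hc
      simp only [if_pos trivial]
      cases hns : nlSplit rest with
      | nil => exact absurd hns (nlSplit_ne_nil rest)
      | cons a t =>
        rw [hns] at ih
        rw [intercalate_cons2]
        simpa using ih
    · simp only [if_neg hc]
      cases hns : nlSplit rest with
      | nil => exact absurd hns (nlSplit_ne_nil rest)
      | cons a t =>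
        rw [hns] at ih
        cases t with
        | nil => simpa [List.modifyHead, List.intercalate] using congrArg (c :: ·) ih
        | cons b u =>
          simp only [List.modifyHead]
          rw [intercalate_cons2] at ih ⊢
          simpa using congrArg (c :: ·) ih

-- joining the split lines back with '\n' gives the input string exactly
theorem join_pySplit (context : String) :
    PySem.Str.join "\n" (pySplit context "\n") = context := by
  unfold pySplit PySem.Str.join PySem.Chars.join
  have hsep : ("\n" : String).toList = ['\n'] := rfl
  rw [hsep, splitOn_nl_eq]
  have hmap : List.map String.toList (List.map String.ofList (nlSplit context.toList))
      = nlSplit context.toList := by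
    simp [List.map_map, Function.comp_def]
  rw [hmap, intercalate_nlSplit]
  exact String.ofList_toList

-- the per-line speaker value both ports compute on a matching line
def lineSpeaker (line : String) : Option String :=
  if PySem.Str.startswith line "**Player Name**:" = true then
    some (PySem.Str.strip (PySem.List.pyGetD (pySplit line ": ") (-1) ""))
  else none

theorem findSpeakerRev_append (xs ys : List String) :
    findSpeakerRev (xs ++ ys) = (findSpeakerRev xs).or (findSpeakerRev ys) := by
  induction xs with
  | nil => simp [findSpeakerRev]
  | cons a t ih =>
    simp only [List.cons_append, findSpeakerRev]
    split_ifs with h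
    · simp
    · simpa using ih

-- A's loop invariant: the fold accumulates all lines and keeps the LAST matching
-- line's speaker, which is the FIRST match of the reversed list.
theorem foldA_eq (lines : List String) : ∀ (rs0 : List String) (sp0 : Option String),
    lines.foldl (fun (st : List String × Option String) line =>
      let rs := st.1 ++ [line]
      let speaker_name :=
        if PySem.Str.startswith line "**Player Name**:" = true then
          some (PySem.Str.strip (PySem.List.pyGetD (pySplit line ": ") (-1) ""))
        else st.2
      (rs, speaker_name)) (rs0, sp0)
    = (rs0 ++ lines, (findSpeakerRev lines.reverse).or sp0) := by
  induction lines with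
  | nil => intro rs0 sp0; simp [findSpeakerRev]
  | cons a t ih =>
    intro rs0 sp0
    simp only [List.foldl_cons]
    rw [ih]
    simp only [List.reverse_cons, findSpeakerRev_append]
    rw [Prod.mk.injEq]
    refine ⟨by simp, ?_⟩
    show _ = ((findSpeakerRev t.reverse).or (findSpeakerRev [a])).or sp0
    rw [Option.or_assoc]
    congr 1
    simp only [findSpeakerRev]
    split_ifs with h <;> simp

-- ===== VERDICT (by name: the statement is the Claim_ definition above) =====
theorem min_context_for_intent_guessing_spec : Claim_equal_min_context_for_intent_guessing := by
  intro context _hdom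
  show min_context_for_intent_guessing context = min_context_for_intent_guessing_alt context
  simp only [min_context_for_intent_guessing, min_context_for_intent_guessing_alt]
  rw [foldA_eq]
  simp [join_pySplit]
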